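-- pv_equiv track=rewrite | github.com/AbdulkadirUgas/ARC | arc_visualizer/deterministic_arc_solver.py | apply_color_map
-- ===== SOURCE A (Python) =====
-- Grid = list[list[int]]
--
-- def apply_color_map(grid: Grid, mapping: dict[int, int]) -> Grid | None:
--     out = []
--     for row in grid:
--         mapped_row = []
--         for cell in row:
--             if cell not in mapping:
--                 return None
--             mapped_row.append(mapping[cell])
--         out.append(mapped_row)
--     return out
-- ===== SOURCE B (Python) =====
-- def apply_color_map(grid, mapping):
--     # Two passes: validate all cells first, then a branch-free build.
--     if not all(cell in mapping for row in grid for cell in row):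
--         return None
--     return [[mapping[cell] for cell in row] for row in grid]
-- ===== Notes on version B (the rewrite author's own statement) =====
-- stated objective: simpler
-- what changed: A fuses the membership check into a single guarded building loop with early return; B splits it into a separate all()-based validation pass followed by a branch-free nested-comprehension build pass.
import Mathlib
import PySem

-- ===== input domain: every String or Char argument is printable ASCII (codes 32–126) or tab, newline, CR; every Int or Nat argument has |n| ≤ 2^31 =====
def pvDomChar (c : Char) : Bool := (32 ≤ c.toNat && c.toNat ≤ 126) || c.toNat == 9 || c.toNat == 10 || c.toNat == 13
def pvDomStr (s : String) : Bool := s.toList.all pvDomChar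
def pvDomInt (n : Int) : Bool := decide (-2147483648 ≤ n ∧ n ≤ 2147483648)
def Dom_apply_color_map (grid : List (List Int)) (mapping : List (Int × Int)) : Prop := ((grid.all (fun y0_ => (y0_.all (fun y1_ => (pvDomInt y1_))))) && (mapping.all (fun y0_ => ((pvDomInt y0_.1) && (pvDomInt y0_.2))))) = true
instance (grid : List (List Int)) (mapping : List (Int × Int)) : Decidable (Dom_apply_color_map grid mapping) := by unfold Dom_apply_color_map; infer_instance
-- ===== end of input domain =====

-- B splits A's single guarded mapping loop into a validation pass plus a branch-free build pass (same cost, simpler).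
-- ===== PORT A =====
def applyRowA (mapping : List (Int × Int)) : List Int → List Int → Option (List Int)
  | mapped_row, [] => some mapped_row
  | mapped_row, cell :: rest =>
    if (mapping.map Prod.fst).contains cell then
      -- 'mapping[cell]': first-match lookup; the getD default is unreachable under the contains guard
      applyRowA mapping (mapped_row ++ [(mapping.lookup cell).getD 0]) rest
    else none

def applyGridA (mapping : List (Int × Int)) : List (List Int) → List (List Int) → Option (List (List Int))
  | out, [] => some out
  | out, row :: rest =>
    match applyRowA mapping [] row with
    | none => none
    | some mapped_row => applyGridA mapping (out ++ [mapped_row]) rest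

def apply_color_map (grid : List (List Int)) (mapping : List (Int × Int)) : Option (List (List Int)) :=
  applyGridA mapping [] grid

-- ===== PORT B =====
def apply_color_map_alt (grid : List (List Int)) (mapping : List (Int × Int)) : Option (List (List Int)) :=
  if grid.all (fun row => row.all (fun cell => (mapping.map Prod.fst).contains cell)) then
    some (grid.map (fun row => row.map (fun cell => (mapping.lookup cell).getD 0)))
  else
    none

-- ===== PRECONDITION & SPEC =====
def Spec_apply_color_map (grid : List (List Int)) (mapping : List (Int × Int)) (out : Option (List (List Int))) : Prop := out = apply_color_map_alt grid mapping
instance (grid : List (List Int)) (mapping : List (Int × Int)) (out : Option (List (List Int))) : Decidable (Spec_apply_color_map grid mapping out) := by unfold Spec_apply_color_map; infer_instance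

-- ===== CLAIM (what is proved, stated in full; the proofs are below) =====
def Claim_equal_apply_color_map : Prop := ∀ (grid : List (List Int)) (mapping : List (Int × Int)), Dom_apply_color_map grid mapping → Spec_apply_color_map grid mapping (apply_color_map grid mapping)

-- ===== LEMMAS AND PROOFS =====


lemma applyRowA_eq (mapping : List (Int × Int)) (row acc : List Int) :
    applyRowA mapping acc row =
      if row.all (fun cell => (mapping.map Prod.fst).contains cell) then
        some (acc ++ row.map (fun cell => (mapping.lookup cell).getD 0))
      else none := by
  induction row generalizing acc with
  | nil => simp [applyRowA]
  | cons c rest ih =>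
    simp only [applyRowA, List.all_cons, List.map_cons]
    cases (mapping.map Prod.fst).contains c
    · simp
    · simp only [ih, Bool.true_and, if_true]
      cases rest.all (fun cell => (mapping.map Prod.fst).contains cell) <;> simp

lemma applyGridA_eq (mapping : List (Int × Int)) (grid acc : List (List Int)) :
    applyGridA mapping acc grid =
      if grid.all (fun row => row.all (fun cell => (mapping.map Prod.fst).contains cell)) then
        some (acc ++ grid.map (fun row => row.map (fun cell => (mapping.lookup cell).getD 0)))
      else none := by
  induction grid generalizing acc with
  | nil => simp [applyGridA]
  | cons r rest ih =>
    simp only [applyGridA, List.all_cons, applyRowA_eq, List.map_cons]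
    cases r.all (fun cell => (mapping.map Prod.fst).contains cell)
    · simp
    · simp only [ih, Bool.true_and]
      cases rest.all (fun row => row.all fun cell => (mapping.map Prod.fst).contains cell) <;> simp

-- ===== VERDICT (by name: the statement is the Claim_ definition above) =====
theorem apply_color_map_spec : Claim_equal_apply_color_map := by
  intro grid mapping _
  unfold Spec_apply_color_map apply_color_map apply_color_map_alt
  simp [applyGridA_eq]
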